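-- pv_equiv track=rewrite | github.com/iesl/expLinkage | src/hier_clust/expLink.py | getPidToPredClusters
-- ===== SOURCE A (Python) =====
-- def getPidToPredClusters(pidToParent, numPoints):
-- 	pidToPredCluster = {}
-- 	for pid in range(numPoints):
-- 		currPid = pid
-- 		parentPid = currPid
-- 		while currPid in pidToParent:
-- 			parentPid = pidToParent[currPid]
--
-- 			currPid = parentPid
--
-- 		pidToPredCluster[pid] = parentPid
-- 	return pidToPredCluster
-- ===== SOURCE B (Python) =====
-- def getPidToPredClusters(pidToParent, numPoints):
--     # pointer doubling: repeatedly square the parent map, then answer each pid by one lookup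
--     f = dict(pidToParent)
--     t = 1
--     while t < len(pidToParent):
--         f = {k: f.get(v, v) for k, v in f.items()}
--         t *= 2
--     return {pid: f.get(pid, pid) for pid in range(numPoints)}
-- ===== Notes on version B (the rewrite author's own statement) =====
-- stated objective: alternative
-- what changed: B replaces A's per-pid walk up the parent chain by pointer doubling: it repeatedly squares the parent map (log2(len) rounds of 'f = {k: f.get(v, v) ...}'), after which each pid's root is a single lookup; A re-walks the whole chain for every pid.
import Mathlib
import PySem

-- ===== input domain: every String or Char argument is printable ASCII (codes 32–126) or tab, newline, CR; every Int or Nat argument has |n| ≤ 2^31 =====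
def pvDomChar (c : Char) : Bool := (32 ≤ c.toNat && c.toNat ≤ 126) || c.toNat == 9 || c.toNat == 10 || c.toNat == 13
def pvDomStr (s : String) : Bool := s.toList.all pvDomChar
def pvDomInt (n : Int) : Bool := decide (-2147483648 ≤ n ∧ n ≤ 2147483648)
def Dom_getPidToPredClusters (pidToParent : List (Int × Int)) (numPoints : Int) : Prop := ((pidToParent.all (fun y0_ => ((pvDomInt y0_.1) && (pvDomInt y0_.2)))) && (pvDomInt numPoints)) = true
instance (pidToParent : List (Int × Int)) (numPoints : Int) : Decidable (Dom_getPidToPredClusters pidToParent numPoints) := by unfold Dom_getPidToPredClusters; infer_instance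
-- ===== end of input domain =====

-- B replaces A's per-pid chain walk by pointer doubling (repeatedly squaring the
-- parent map), a different algorithm that resolves every pid by one final lookup.

-- ===== PORT A =====
-- A's inner while loop: follow the parent chain until the current pid has no parent.
-- The Nat fuel is only a termination guard: under Pre_ the chain leaves the key set
-- within pidToParent.length steps, so fuel length+1 never runs out.
def pvChase (d : PySem.Dict Int Int) : Nat → Int → Int
  | 0, x => x
  | f+1, x =>
    match d.get? x with
    | none => x
    | some p => pvChase d f p

def getPidToPredClusters (pidToParent : List (Int × Int)) (numPoints : Int) : List (Int × Int) :=
  let d := PySem.Dict.ofList pidToParent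
  ((PySem.List.pyRange 0 numPoints 1).foldl
    (fun res pid => res.insert pid (pvChase d (pidToParent.length + 1) pid))
    PySem.Dict.empty).items

-- ===== PORT B =====
-- one doubling step: {k: f.get(v, v) for k, v in f.items()}
def pvDouble (f : PySem.Dict Int Int) : PySem.Dict Int Int :=
  f.items.foldl (fun acc kv => acc.insert kv.1 (f.getD kv.2 kv.2)) PySem.Dict.empty

-- B's while loop 'while t < n: f = double(f); t *= 2'; the Nat fuel is only a
-- termination guard (t doubles from 1, so n iterations always suffice).
def pvDoubleLoop (n : Nat) : Nat → PySem.Dict Int Int → Nat → PySem.Dict Int Int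
  | 0, f, _ => f
  | fuel+1, f, t => if t < n then pvDoubleLoop n fuel (pvDouble f) (t*2) else f

def getPidToPredClusters_alt (pidToParent : List (Int × Int)) (numPoints : Int) : List (Int × Int) :=
  let f := pvDoubleLoop pidToParent.length pidToParent.length (PySem.Dict.ofList pidToParent) 1
  ((PySem.List.pyRange 0 numPoints 1).foldl
    (fun res pid => res.insert pid (f.getD pid pid)) PySem.Dict.empty).items

-- ===== PRECONDITION & SPEC =====
-- one step of the parent map: x's parent if x is a key, else x itself
def pvStep (d : PySem.Dict Int Int) (x : Int) : Int := d.getD x x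

-- Pre_ excludes exactly the inputs on which Python A loops forever: some pid in
-- range(numPoints) reaches a cycle of the parent map (its chain never leaves the key
-- set); such a chain must start at a key in [0, numPoints), so Pre_ quantifies over keys.
def Pre_getPidToPredClusters (pidToParent : List (Int × Int)) (numPoints : Int) : Prop :=
  ∀ k ∈ (PySem.Dict.ofList pidToParent).keys, 0 ≤ k → k < numPoints →
    (PySem.Dict.ofList pidToParent).get?
      ((pvStep (PySem.Dict.ofList pidToParent))^[pidToParent.length] k) = none

instance (pidToParent : List (Int × Int)) (numPoints : Int) : Decidable (Pre_getPidToPredClusters pidToParent numPoints) := by unfold Pre_getPidToPredClusters; infer_instance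

def pvWitness_getPidToPredClusters : (List (Int × Int)) × Int := ([(0, 2), (1, 2), (2, 5)], 3)

def Spec_getPidToPredClusters (pidToParent : List (Int × Int)) (numPoints : Int) (out : List (Int × Int)) : Prop := out = getPidToPredClusters_alt pidToParent numPoints
instance (pidToParent : List (Int × Int)) (numPoints : Int) (out : List (Int × Int)) : Decidable (Spec_getPidToPredClusters pidToParent numPoints out) := by unfold Spec_getPidToPredClusters; infer_instance

-- ===== CLAIM (what is proved, stated in full; the proofs are below) =====
def Claim_equal_getPidToPredClusters : Prop := ∀ (pidToParent : List (Int × Int)) (numPoints : Int), Dom_getPidToPredClusters pidToParent numPoints → Pre_getPidToPredClusters pidToParent numPoints → Spec_getPidToPredClusters pidToParent numPoints (getPidToPredClusters pidToParent numPoints)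

-- ===== LEMMAS AND PROOFS =====

theorem pvStep_iterate_fix (d : PySem.Dict Int Int) (m : Nat) (p : Int)
    (h : d.get? p = none) : (pvStep d)^[m] p = p := by
  induction m with
  | zero => rfl
  | succ m ih =>
    rw [Function.iterate_succ_apply, show pvStep d p = p by
      simp [pvStep, PySem.Dict.getD_eq_get?_getD, h], ih]

-- A's fuelled chase is iteration of the one-step map
theorem pvChase_eq_iterate (d : PySem.Dict Int Int) (f : Nat) :
    ∀ x, pvChase d f x = (pvStep d)^[f] x := by
  induction f with
  | zero => intro x; rfl
  | succ f ih =>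
    intro x
    cases h : d.get? x with
    | none =>
      simp only [pvChase, h]
      rw [Function.iterate_succ_apply, show pvStep d x = x by
        simp [pvStep, PySem.Dict.getD_eq_get?_getD, h], pvStep_iterate_fix d f x h]
    | some p =>
      simp only [pvChase, h]
      rw [ih p, Function.iterate_succ_apply, show pvStep d x = p by
        simp [pvStep, PySem.Dict.getD_eq_get?_getD, h]]

-- once the chain has left the key set, further iteration is constant
theorem pvIter_stable (d : PySem.Dict Int Int) (a b : Nat) (x : Int)
    (h : d.get? ((pvStep d)^[a] x) = none) (hab : a ≤ b) :
    (pvStep d)^[b] x = (pvStep d)^[a] x := by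
  obtain ⟨c, rfl⟩ := Nat.exists_eq_add_of_le hab
  rw [show a + c = c + a by omega, Function.iterate_add_apply,
    pvStep_iterate_fix d c _ h]

theorem pvDouble_keys (f : PySem.Dict Int Int) (hnd : f.keys.Nodup) :
    (pvDouble f).keys = f.keys := by
  unfold pvDouble
  have h := PySem.Dict.items_foldl_insert_fresh f.items (fun kv => kv.1)
    (fun kv => f.getD kv.2 kv.2) PySem.Dict.empty
    (fun a _ => PySem.Dict.contains_empty a.1) (by simpa [PySem.Dict.keys] using hnd)
  simp only [PySem.Dict.keys] at *
  rw [h]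
  simp [PySem.Dict.empty, Function.comp]

theorem pvDouble_get? (f : PySem.Dict Int Int) (hnd : f.keys.Nodup) (k : Int) :
    (pvDouble f).get? k = (f.get? k).map (fun v => f.getD v v) := by
  have hitems : (pvDouble f).items
      = f.items.map (fun kv => (kv.1, f.getD kv.2 kv.2)) := by
    unfold pvDouble
    have h := PySem.Dict.items_foldl_insert_fresh f.items (fun kv => kv.1)
      (fun kv => f.getD kv.2 kv.2) PySem.Dict.empty
      (fun a _ => PySem.Dict.contains_empty a.1) (by simpa [PySem.Dict.keys] using hnd)
    simpa using h
  have hnd' : (pvDouble f).keys.Nodup := by rw [pvDouble_keys f hnd]; exact hnd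
  cases h : f.get? k with
  | none =>
    have hk : k ∉ f.keys := (PySem.Dict.get?_eq_none_iff_not_mem_keys f k).mp h
    have : k ∉ (pvDouble f).keys := by rw [pvDouble_keys f hnd]; exact hk
    simp [(PySem.Dict.get?_eq_none_iff_not_mem_keys (pvDouble f) k).mpr this]
  | some v =>
    have hmem : (k, v) ∈ f.items := PySem.Dict.mem_items_of_get?_eq_some f h
    have hmem' : (k, f.getD v v) ∈ (pvDouble f).items := by
      rw [hitems]
      exact List.mem_map.mpr ⟨(k, v), hmem, rfl⟩
    simp [PySem.Dict.get?_of_mem_items (pvDouble f) hmem' hnd']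

-- one doubling step squares the exponent of the invariant
theorem pvDouble_Q (d f : PySem.Dict Int Int) (m : Nat) (hnd : f.keys.Nodup)
    (hQ : ∀ k, f.get? k = (d.get? k).map (fun _ => (pvStep d)^[m] k)) :
    ∀ k, (pvDouble f).get? k = (d.get? k).map (fun _ => (pvStep d)^[m + m] k) := by
  intro k
  rw [pvDouble_get? f hnd k, hQ k]
  cases h : d.get? k with
  | none => simp
  | some w =>
    simp only [Option.map]
    congr 1
    rw [PySem.Dict.getD_eq_get?_getD, hQ ((pvStep d)^[m] k)]
    cases hv : d.get? ((pvStep d)^[m] k) with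
    | none =>
      simp only [Option.map_none, Option.getD]
      rw [show m + m = m + m from rfl, Function.iterate_add_apply,
        pvStep_iterate_fix d m _ hv]
    | some u =>
      simp only [Option.map_some, Option.getD]
      rw [Function.iterate_add_apply]

theorem pvLoop_spec (d : PySem.Dict Int Int) (n : Nat) :
    ∀ (fuel : Nat) (f : PySem.Dict Int Int) (t m : Nat),
      f.keys.Nodup →
      (∀ k, f.get? k = (d.get? k).map (fun _ => (pvStep d)^[m] k)) →
      1 ≤ t → t ≤ m → n ≤ fuel + t →
      ∃ m', n ≤ m' ∧
        ∀ k, (pvDoubleLoop n fuel f t).get? k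
          = (d.get? k).map (fun _ => (pvStep d)^[m'] k) := by
  intro fuel
  induction fuel with
  | zero =>
    intro f t m hnd hQ h1 htm hn
    exact ⟨m, by omega, hQ⟩
  | succ fuel ih =>
    intro f t m hnd hQ h1 htm hn
    simp only [pvDoubleLoop]
    by_cases ht : t < n
    · rw [if_pos ht]
      exact ih (pvDouble f) (t*2) (m+m)
        (by rw [List.Nodup, ← List.Nodup]; rw [pvDouble_keys f hnd]; exact hnd)
        (pvDouble_Q d f m hnd hQ) (by omega) (by omega) (by omega)
    · rw [if_neg ht]
      exact ⟨m, by omega, hQ⟩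

-- ===== VERDICT (by name: the statement is the Claim_ definition above) =====
theorem getPidToPredClusters_spec : Claim_equal_getPidToPredClusters := by
  intro pidToParent numPoints _ hpre
  unfold Spec_getPidToPredClusters getPidToPredClusters getPidToPredClusters_alt
  set d := PySem.Dict.ofList pidToParent with hd
  set L := pidToParent.length with hL
  have hbase : ∀ k, d.get? k = (d.get? k).map (fun _ => (pvStep d)^[1] k) := by
    intro k
    cases h : d.get? k with
    | none => simp
    | some v =>
      simp only [Option.map_some]
      congr 1
      simp [pvStep, PySem.Dict.getD_eq_get?_getD, h]
  obtain ⟨m', hm', hQ⟩ := pvLoop_spec d L L d 1 1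
    (PySem.Dict.nodup_keys_ofList pidToParent) hbase (le_refl 1) (le_refl 1) (by omega)
  simp only
  congr 1
  apply PySem.List.foldl_congr_mem
  intro acc pid hpid
  congr 1
  rcases PySem.List.mem_pyRange_one.mp hpid with ⟨h0, h1⟩
  rw [pvChase_eq_iterate, PySem.Dict.getD_eq_get?_getD, hQ pid]
  cases h : d.get? pid with
  | none =>
    simp only [Option.map_none, Option.getD]
    exact pvStep_iterate_fix d (L+1) pid h
  | some v =>
    have hkey : pid ∈ d.keys := by
      by_contra hmem
      rw [(PySem.Dict.get?_eq_none_iff_not_mem_keys d pid).mpr hmem] at h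
      cases h
    have hstab := hpre pid hkey h0 h1
    simp only [Option.map_some, Option.getD]
    rw [pvIter_stable d L (L+1) pid hstab (by omega),
      pvIter_stable d L m' pid hstab (by omega)]
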